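-- pv_equiv track=rewrite | github.com/Shubham-1707/first-solar-dashboard | engine.py | latch_sev
-- ===== SOURCE A (Python) =====
-- LATCH                 = 3           # samples required to confirm a trend
--
-- def latch_sev(values, n: int = LATCH):
--     out, run, last = [], 0, ""
--     for v in values:
--         if v == last and v:
--             run += 1
--         else:
--             run, last = (1 if v else 0), v
--         out.append(v if run >= n else "")
--     return out
-- ===== SOURCE B (Python) =====
-- LATCH = 3
--
-- def latch_sev(values, n: int = LATCH):
--     # group-then-expand: split into maximal runs of equal values, expand each run
--     out = []
--     vals = list(values)
--     i = 0
--     while i < len(vals):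
--         g = vals[i]
--         j = i + 1
--         while j < len(vals) and vals[j] == g:
--             j += 1
--         count = j - i
--         if g:
--             out.extend("" if k + 1 < n else g for k in range(count))
--         else:
--             out.extend([""] * count)
--         i = j
--     return out
-- ===== Notes on version B (the rewrite author's own statement) =====
-- stated objective: alternative
-- what changed: B splits the input into maximal runs of equal values first and expands each run at once (empty-string runs expand to blanks, truthy runs latch from the n-th position), replacing A's incremental run/last state machine.
import Mathlib
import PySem

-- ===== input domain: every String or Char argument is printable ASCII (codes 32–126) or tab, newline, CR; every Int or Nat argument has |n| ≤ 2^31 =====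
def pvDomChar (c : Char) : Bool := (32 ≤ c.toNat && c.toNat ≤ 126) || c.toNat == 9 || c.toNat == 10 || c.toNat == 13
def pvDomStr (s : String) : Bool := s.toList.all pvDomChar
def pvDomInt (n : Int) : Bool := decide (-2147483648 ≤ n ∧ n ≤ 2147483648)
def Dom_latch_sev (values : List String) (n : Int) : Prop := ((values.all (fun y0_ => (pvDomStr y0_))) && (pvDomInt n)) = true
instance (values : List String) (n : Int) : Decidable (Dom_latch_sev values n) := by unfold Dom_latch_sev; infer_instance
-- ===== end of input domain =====

-- B regroups the input into maximal runs of equal values and expands each run at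
-- once, instead of A's incremental run/last state machine; same cost, different
-- decomposition.

-- ===== PORT A =====
-- literal port of A: one pass over values carrying (out, run, last)
def stepA (n : Int) (s : List String × Int × String) (v : String) : List String × Int × String :=
  let rl : Int × String :=
    if v = s.2.2 ∧ v ≠ "" then (s.2.1 + 1, s.2.2)
    else ((if v ≠ "" then 1 else 0), v)
  (s.1 ++ [if rl.1 ≥ n then v else ""], rl.1, rl.2)

def latch_sev (values : List String) (n : Int) : List String :=
  (values.foldl (stepA n) ([], 0, "")).1

-- ===== PORT B =====
-- Source B's inner while-scan: the maximal run at the head, then continue on the rest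
def groupRuns : List String → List (String × Nat)
  | [] => []
  | v :: vs => (v, 1 + (vs.takeWhile (· = v)).length) :: groupRuns (vs.dropWhile (· = v))
termination_by l => l.length
decreasing_by
  simp only [List.length_cons]
  exact Nat.lt_succ_of_le (List.length_dropWhile_le _ vs)

def expandRun (n : Int) (g : String) (c : Nat) : List String :=
  if g = "" then List.replicate c ""
  else (List.range c).map (fun (k : Nat) => if (k : Int) + 1 < n then "" else g)

def latch_sev_alt (values : List String) (n : Int) : List String :=
  (groupRuns values).flatMap (fun p => expandRun n p.1 p.2)

-- ===== PRECONDITION & SPEC =====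
def Spec_latch_sev (values : List String) (n : Int) (out : List String) : Prop := out = latch_sev_alt values n
instance (values : List String) (n : Int) (out : List String) : Decidable (Spec_latch_sev values n out) := by unfold Spec_latch_sev; infer_instance

-- ===== CLAIM (what is proved, stated in full; the proofs are below) =====
def Claim_equal_latch_sev : Prop := ∀ (values : List String) (n : Int), Dom_latch_sev values n → Spec_latch_sev values n (latch_sev values n)

-- ===== LEMMAS AND PROOFS =====

-- A's loop body as a recursive function producing only the appended outputs
def gA (n : Int) : List String → Int → String → List String
  | [], _, _ => []
  | v :: vs, run, last =>
    if v = last ∧ v ≠ "" then (if run + 1 ≥ n then v else "") :: gA n vs (run + 1) last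
    else (if (if v ≠ "" then (1:Int) else 0) ≥ n then v else "")
          :: gA n vs (if v ≠ "" then 1 else 0) v

theorem stepA_pos (n : Int) (out : List String) (run : Int) (last v : String)
    (h : v = last ∧ v ≠ "") :
    stepA n (out, run, last) v = (out ++ [if run + 1 ≥ n then v else ""], run + 1, last) := by
  simp only [stepA]; rw [if_pos h]

theorem stepA_neg (n : Int) (out : List String) (run : Int) (last v : String)
    (h : ¬(v = last ∧ v ≠ "")) :
    stepA n (out, run, last) v
      = (out ++ [if (if v ≠ "" then (1:Int) else 0) ≥ n then v else ""],
         (if v ≠ "" then 1 else 0), v) := by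
  simp only [stepA]; rw [if_neg h]

theorem foldA (n : Int) (values : List String) :
    ∀ (out : List String) (run : Int) (last : String),
    (values.foldl (stepA n) (out, run, last)).1 = out ++ gA n values run last := by
  induction values with
  | nil => intro out run last; simp [gA]
  | cons v vs ih =>
    intro out run last
    by_cases h : v = last ∧ v ≠ ""
    · rw [List.foldl_cons, stepA_pos n out run last v h, ih]
      rw [show gA n (v :: vs) run last
            = (if run + 1 ≥ n then v else "") :: gA n vs (run + 1) last from by
        simp only [gA]; rw [if_pos h]]
      simp
    · rw [List.foldl_cons, stepA_neg n out run last v h, ih]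
      rw [show gA n (v :: vs) run last
            = (if (if v ≠ "" then (1:Int) else 0) ≥ n then v else "")
                :: gA n vs (if v ≠ "" then 1 else 0) v from by
        simp only [gA]; rw [if_neg h]]
      simp

theorem groupRuns_cons (v : String) (vs : List String) :
    groupRuns (v :: vs)
      = (v, 1 + (vs.takeWhile (· = v)).length) :: groupRuns (vs.dropWhile (· = v)) := by
  simp [groupRuns]

theorem alt_cons (n : Int) (v : String) (vs : List String) :
    latch_sev_alt (v :: vs) n
      = expandRun n v (1 + (vs.takeWhile (· = v)).length)
        ++ latch_sev_alt (vs.dropWhile (· = v)) n := by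
  simp [latch_sev_alt, groupRuns_cons]

theorem alt_nil (n : Int) : latch_sev_alt [] n = [] := by
  simp [latch_sev_alt, groupRuns]

theorem alt_empty_cons (n : Int) (vs : List String) :
    latch_sev_alt ("" :: vs) n = "" :: latch_sev_alt vs n := by
  cases vs with
  | nil => rw [alt_cons]; simp [expandRun, alt_nil, List.takeWhile]
  | cons w vs' =>
    by_cases hw : w = ""
    · subst hw
      rw [alt_cons, alt_cons]
      have ht : (("" : String) :: vs').takeWhile (· = ("" : String))
          = "" :: vs'.takeWhile (· = ("" : String)) := by simp [List.takeWhile]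
      have hd : (("" : String) :: vs').dropWhile (· = ("" : String))
          = vs'.dropWhile (· = ("" : String)) := by simp [List.dropWhile]
      rw [ht, hd]
      simp only [expandRun, List.length_cons]
      rw [show 1 + ((vs'.takeWhile (· = ("" : String))).length + 1)
            = (1 + (vs'.takeWhile (· = ("" : String))).length) + 1 from by omega]
      rw [List.replicate_succ]
      simp
    · rw [alt_cons]
      have ht : (w :: vs').takeWhile (· = ("" : String)) = [] := by
        simp [List.takeWhile, hw]
      have hd : (w :: vs').dropWhile (· = ("" : String)) = w :: vs' := by
        simp [List.dropWhile, hw]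
      rw [ht, hd]
      simp [expandRun]

theorem head_dropWhile_ne (v : String) : ∀ (l : List String) (w : String),
    (l.dropWhile (· = v)).head? = some w → w ≠ v := by
  intro l
  induction l with
  | nil => intro w h; simp [List.dropWhile] at h
  | cons x xs ih =>
    intro w h
    by_cases hx : x = v
    · rw [List.dropWhile_cons_of_pos (by simp [hx])] at h
      exact ih w h
    · rw [List.dropWhile_cons_of_neg (by simp [hx])] at h
      simp at h
      subst h; exact hx

theorem cont (n : Int) (v : String) (hv : v ≠ "") :
    ∀ (vs : List String) (r : Int),
    gA n vs r v
      = (List.range (vs.takeWhile (· = v)).length).map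
          (fun (k : Nat) => if r + ((k : Int) + 1) ≥ n then v else "")
        ++ gA n (vs.dropWhile (· = v)) (r + ((vs.takeWhile (· = v)).length : Int)) v := by
  intro vs
  induction vs with
  | nil => intro r; simp [List.takeWhile, List.dropWhile]
  | cons w vs' ih =>
    intro r
    by_cases hw : w = v
    · subst hw
      rw [List.takeWhile_cons_of_pos (by simp), List.dropWhile_cons_of_pos (by simp)]
      rw [show gA n (w :: vs') r w = (if r + 1 ≥ n then w else "") :: gA n vs' (r + 1) w from by
        simp [gA, hv]]
      rw [ih (r + 1)]
      rw [List.length_cons, List.range_succ_eq_map, List.map_cons, List.map_map]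
      simp only [List.cons_append]
      have hM : List.map ((fun (k : Nat) => if r + ((k : Int) + 1) ≥ n then w else "") ∘ Nat.succ)
          (List.range (vs'.takeWhile (· = w)).length)
          = List.map (fun (k : Nat) => if (r + 1) + ((k : Int) + 1) ≥ n then w else "")
            (List.range (vs'.takeWhile (· = w)).length) := by
        apply List.map_congr_left
        intro k _
        simp only [Function.comp]
        apply if_congr _ rfl rfl
        push_cast
        omega
      have hT : r + ((((vs'.takeWhile (· = w)).length + 1 : Nat)) : Int)
          = (r + 1) + ((vs'.takeWhile (· = w)).length : Int) := by push_cast; omega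
      rw [hM, hT]
      norm_num
    · rw [List.takeWhile_cons_of_neg (by simp [hw]), List.dropWhile_cons_of_neg (by simp [hw])]
      simp

theorem fresh (n : Int) (values : List String) (r : Int) (l : String)
    (h : ∀ v, values.head? = some v → v = l → v = "") :
    gA n values r l = latch_sev_alt values n := by
  match values with
  | [] => simp [gA, alt_nil]
  | v :: vs =>
    have hcond : ¬(v = l ∧ v ≠ "") := fun hc => hc.2 (h v rfl hc.1)
    by_cases hv : v = ""
    · subst hv
      rw [show gA n ("" :: vs) r l = "" :: gA n vs 0 "" from by
        simp only [gA]; rw [if_neg hcond]; simp]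
      rw [fresh n vs 0 "" (fun w _ hw => hw), alt_empty_cons]
    · rw [show gA n (v :: vs) r l
            = (if (1:Int) ≥ n then v else "") :: gA n vs 1 v from by
        simp only [gA]; rw [if_neg hcond]; simp [hv]]
      rw [cont n v hv vs 1]
      rw [fresh n (vs.dropWhile (· = v)) (1 + ((vs.takeWhile (· = v)).length : Int)) v
        (fun w hw hwv => absurd hwv (head_dropWhile_ne v vs w hw))]
      rw [alt_cons]
      rw [show expandRun n v (1 + (vs.takeWhile (· = v)).length)
            = (List.range (1 + (vs.takeWhile (· = v)).length)).map
                (fun (k : Nat) => if (k : Int) + 1 < n then "" else v) from by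
        simp [expandRun, hv]]
      rw [show 1 + (vs.takeWhile (· = v)).length = (vs.takeWhile (· = v)).length + 1 from by omega]
      rw [List.range_succ_eq_map, List.map_cons, List.map_map]
      simp only [List.cons_append]
      congr 1
      · norm_num
        split_ifs <;> first | rfl | omega
      · congr 1
        apply List.map_congr_left
        intro k _
        simp only [Function.comp]
        split_ifs <;> first | rfl | (exfalso; push_cast at *; omega)
termination_by values.length
decreasing_by
  · simp
  · simp only [List.length_cons]
    exact Nat.lt_succ_of_le (List.length_dropWhile_le _ vs)

-- ===== VERDICT (by name: the statement is the Claim_ definition above) =====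
theorem latch_sev_spec : Claim_equal_latch_sev := by
  intro values n _
  unfold Spec_latch_sev latch_sev
  rw [foldA, List.nil_append]
  exact fresh n values 0 "" (fun v _ hv => hv)
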